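-- pv_equiv track=rewrite | github.com/hirokame/Neuropixels_pipeline | postanalysis/data_loader_refactored.py | _dtype_matches
-- ===== SOURCE A (Python) =====
-- def _dtype_matches(expected: str, actual: str) -> bool:
--     """Check if dtypes match (with some flexibility)."""
--     # Normalize dtypes
--     dtype_map = {
--         'int64': ['int64', 'int32', 'int'],
--         'float64': ['float64', 'float32', 'float'],
--         'bool': ['bool', 'bool_'],
--         '<U4': ['<U4', 'object', 'str'],
--     }
--
--     for key, variants in dtype_map.items():
--         if expected in variants and actual in variants:
--             return True
--
--     return expected == actual
-- ===== SOURCE B (Python) =====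
-- # Precomputed binary relation of all compatible dtype pairs; a match is a single
-- # membership test of the ordered pair (plus plain equality), no group scanning.
-- _COMPAT = {
--     (x, y)
--     for group in (('int64', 'int32', 'int'),
--                   ('float64', 'float32', 'float'),
--                   ('bool', 'bool_'),
--                   ('<U4', 'object', 'str'))
--     for x in group
--     for y in group
-- }
--
--
-- def _dtype_matches(expected: str, actual: str) -> bool:
--     """Check if dtypes match (with some flexibility)."""
--     return expected == actual or (expected, actual) in _COMPAT
-- ===== Notes on version B (the rewrite author's own statement) =====
-- stated objective: alternative
-- what changed: Replaces the per-call loop over alias groups with two list-membership scans by a precomputed binary relation (the set of all compatible ordered pairs), so a call is one set-membership test of the pair combined with plain equality.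
import Mathlib
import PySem

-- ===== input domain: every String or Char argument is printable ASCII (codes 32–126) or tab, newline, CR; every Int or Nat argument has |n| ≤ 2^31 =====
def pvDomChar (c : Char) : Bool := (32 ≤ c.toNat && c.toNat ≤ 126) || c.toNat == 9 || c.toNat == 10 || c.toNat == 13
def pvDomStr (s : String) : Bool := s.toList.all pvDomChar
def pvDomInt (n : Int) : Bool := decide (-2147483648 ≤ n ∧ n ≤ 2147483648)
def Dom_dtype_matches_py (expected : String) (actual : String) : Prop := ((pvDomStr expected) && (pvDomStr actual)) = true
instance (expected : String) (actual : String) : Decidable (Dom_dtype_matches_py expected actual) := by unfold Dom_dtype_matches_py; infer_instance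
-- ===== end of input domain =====

-- B replaces A's per-call loop over alias groups by a precomputed binary relation (the
-- set of all compatible ordered pairs): a call is one pair-membership test plus equality.

-- ===== PORT A =====
-- the literal dict of A, as an association list in insertion order
def pvDtypeMap : List (String × List String) :=
  [("int64", ["int64", "int32", "int"]),
   ("float64", ["float64", "float32", "float"]),
   ("bool", ["bool", "bool_"]),
   ("<U4", ["<U4", "object", "str"])]

-- the for-loop with early return, as structural recursion over the items
def pvLoopA (expected actual : String) : List (String × List String) → Bool
  | [] => expected == actual
  | (_, variants) :: rest =>
      if variants.contains expected && variants.contains actual then true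
      else pvLoopA expected actual rest

def dtype_matches_py (expected : String) (actual : String) : Bool :=
  pvLoopA expected actual pvDtypeMap

-- ===== PORT B =====
-- the tuple of groups Source B's set comprehension ranges over
def pvGroupsB : List (List String) :=
  [["int64", "int32", "int"],
   ["float64", "float32", "float"],
   ["bool", "bool_"],
   ["<U4", "object", "str"]]

-- the comprehension _COMPAT of Source B: the set of all ordered pairs within one group
def pvCompat : PySem.Set (String × String) :=
  PySem.Set.ofList (pvGroupsB.flatMap (fun g => g.flatMap (fun x => g.map (fun y => (x, y)))))

def dtype_matches_py_alt (expected : String) (actual : String) : Bool :=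
  (expected == actual) || PySem.Set.contains pvCompat (expected, actual)

-- ===== PRECONDITION & SPEC =====
def Spec_dtype_matches_py (expected : String) (actual : String) (out : Bool) : Prop := out = dtype_matches_py_alt expected actual
instance (expected : String) (actual : String) (out : Bool) : Decidable (Spec_dtype_matches_py expected actual out) := by unfold Spec_dtype_matches_py; infer_instance

-- ===== CLAIM =====
def Claim_equal_dtype_matches_py : Prop := ∀ (expected : String) (actual : String), Dom_dtype_matches_py expected actual → Spec_dtype_matches_py expected actual (dtype_matches_py expected actual)

-- ===== LEMMAS AND PROOFS =====

-- A's loop returns true iff some group contains both names, else falls back to equality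
theorem pvLoopA_eq (e a : String) (l : List (String × List String)) :
    pvLoopA e a l = ((l.any fun p => p.2.contains e && p.2.contains a) || (e == a)) := by
  induction l with
  | nil => simp [pvLoopA]
  | cons p rest ih =>
    obtain ⟨k, v⟩ := p
    simp only [pvLoopA, List.any_cons, ih]
    cases hc : (v.contains e && v.contains a) <;> simp

-- membership of a pair in the cross-product set equals "some group contains both"
theorem pvSet_cross_contains (gs : List (List String)) (e a : String) :
    PySem.Set.contains (PySem.Set.ofList (gs.flatMap fun g => g.flatMap fun x => g.map fun y => (x, y))) (e, a)
      = (gs.any fun g => g.contains e && g.contains a) := by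
  rw [Bool.eq_iff_iff, PySem.Set.contains_iff, PySem.Set.mem_ofList]
  simp only [List.mem_flatMap, List.mem_map, List.any_eq_true, Bool.and_eq_true,
    List.contains_iff_mem, Prod.mk.injEq]
  constructor
  · rintro ⟨g, hg, x, hx, y, hy, rfl, rfl⟩
    exact ⟨g, hg, hx, hy⟩
  · rintro ⟨g, hg, he, ha⟩
    exact ⟨g, hg, e, he, a, ha, rfl, rfl⟩

-- ===== VERDICT =====
theorem dtype_matches_py_spec : Claim_equal_dtype_matches_py := by
  intro expected actual _
  unfold Spec_dtype_matches_py dtype_matches_py dtype_matches_py_alt pvCompat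
  rw [pvLoopA_eq, pvSet_cross_contains, Bool.or_comm]
  simp [pvDtypeMap, pvGroupsB]
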